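-- pv_equiv track=rewrite | github.com/GRUUIS/NaN-Pygame-SD5913-Final-Project | testing/inspect_sprites.py | detect_grid
-- ===== SOURCE A (Python) =====
-- def find_separator_ranges(sum_line):
--     # Given a list of ints (sum per col/row), find contiguous ranges where sum>0
--     ranges = []
--     w = len(sum_line)
--     i = 0
--     while i < w:
--         # skip zeros
--         while i < w and sum_line[i] == 0:
--             i += 1
--         if i >= w:
--             break
--         start = i
--         while i < w and sum_line[i] > 0:
--             i += 1
--         end = i  # exclusive
--         ranges.append((start, end))
--     return ranges
--
-- def detect_grid(mask):
--     # mask: list of rows [[bool]] length h each of length w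
--     h = len(mask)
--     w = len(mask[0]) if h else 0
--     # compute column sums and row sums
--     col_sums = [0] * w
--     row_sums = [0] * h
--     for y in range(h):
--         row = mask[y]
--         s = 0
--         for x in range(w):
--             if row[x]:
--                 col_sums[x] += 1
--                 s += 1
--         row_sums[y] = s
--
--     vertical_ranges = find_separator_ranges(col_sums)
--     horizontal_ranges = find_separator_ranges(row_sums)
--
--     # If there are multiple vertical and horizontal ranges, treat as grid
--     if len(vertical_ranges) >= 2 or len(horizontal_ranges) >= 2:
--         # Each cell is intersection of vertical_range x horizontal_range
--         cells = []
--         for vr in vertical_ranges: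
--             for hr in horizontal_ranges:
--                 x0, x1 = vr
--                 y0, y1 = hr
--                 cells.append((x0, y0, x1, y1))
--         return cells
--     return None
-- ===== SOURCE B (Python) =====
-- def detect_grid(mask):
--     # Declarative re-implementation: per-row/per-column truthy counts via
--     # comprehensions, and run detection via shifted-neighbour comparisons
--     # (a run starts where value>0 and predecessor<=0, ends where value>0 and
--     # successor<=0) instead of A's index-based skip/consume state machine.
--     h = len(mask)
--     w = len(mask[0]) if h else 0
--     row_sums = [sum(1 for x in range(w) if row[x]) for row in mask]
--     col_sums = [sum(1 for row in mask if row[x]) for x in range(w)]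
--
--     def runs(sl):
--         starts = [i for i, (v, p) in enumerate(zip(sl, [0] + sl)) if v > 0 and p <= 0]
--         ends = [i + 1 for i, (v, n) in enumerate(zip(sl, sl[1:] + [0])) if v > 0 and n <= 0]
--         return list(zip(starts, ends))
--
--     vertical = runs(col_sums)
--     horizontal = runs(row_sums)
--     if len(vertical) >= 2 or len(horizontal) >= 2:
--         return [(x0, y0, x1, y1) for x0, x1 in vertical for y0, y1 in horizontal]
--     return None
-- ===== Notes on version B (the rewrite author's own statement) =====
-- stated objective: idiomatic
-- what changed: Run detection is done declaratively by comparing each sum entry with its shifted neighbour (run starts where value>0 and predecessor<=0, ends where value>0 and successor<=0) and zipping starts with ends, and the row/column counts are per-row/per-column comprehensions, replacing A's index-based skip-zeros/consume-positives while loops and in-place accumulator updates.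
import Mathlib
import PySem

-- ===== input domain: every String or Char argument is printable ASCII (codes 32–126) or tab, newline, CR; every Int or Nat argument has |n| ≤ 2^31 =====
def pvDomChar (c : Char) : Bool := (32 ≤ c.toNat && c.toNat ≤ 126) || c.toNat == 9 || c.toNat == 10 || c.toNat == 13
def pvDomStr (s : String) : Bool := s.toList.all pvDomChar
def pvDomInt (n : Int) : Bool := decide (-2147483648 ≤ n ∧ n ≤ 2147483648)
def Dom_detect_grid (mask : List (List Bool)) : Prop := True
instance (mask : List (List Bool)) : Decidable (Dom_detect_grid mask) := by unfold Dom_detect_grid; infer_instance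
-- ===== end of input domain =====

-- B re-implements the run detection declaratively (shifted-neighbour comparisons)
-- and the row/column counts as comprehensions, replacing A's index-based
-- skip/consume loops and in-place accumulator updates; same asymptotic cost.

-- ===== PORT A =====
-- inner 'while i < w and sum_line[i] == 0' loop of find_separator_ranges
def pvSkipZeros : List Int → Nat → List Int × Nat
  | [], i => ([], i)
  | v :: t, i => if v = 0 then pvSkipZeros t (i + 1) else (v :: t, i)

-- inner 'while i < w and sum_line[i] > 0' loop of find_separator_ranges
def pvTakePos : List Int → Nat → List Int × Nat
  | [], i => ([], i)
  | v :: t, i => if 0 < v then pvTakePos t (i + 1) else (v :: t, i)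

-- outer 'while i < w' loop; the fuel only makes the recursion total (Python
-- diverges on negative entries, which detect_grid never produces)
def pvFsrGo : Nat → List Int → Nat → List (Int × Int)
  | 0, _, _ => []
  | fuel + 1, sl, i =>
    let p := pvSkipZeros sl i
    if p.1.isEmpty then []
    else
      let q := pvTakePos p.1 p.2
      ((p.2 : Int), (q.2 : Int)) :: pvFsrGo fuel q.1 q.2

def find_separator_ranges (sum_line : List Int) : List (Int × Int) :=
  pvFsrGo (sum_line.length + 1) sum_line 0

-- 'for y in range(h): row = mask[y]; s = 0; for x in range(w): …; row_sums[y] = s'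
-- (row[x] is in range under Pre_; row_sums assembled back-to-front then reversed)
def pvSumsA (w : Nat) (mask : List (List Bool)) : List Int × List Int :=
  mask.foldl (fun (acc : List Int × List Int) row =>
      let inner := (List.range w).foldl (fun (p : List Int × Int) x =>
          if row.getD x false then (p.1.set x (p.1.getD x 0 + 1), p.2 + 1) else p)
        (acc.1, (0 : Int))
      (inner.1, inner.2 :: acc.2))
    (List.replicate w (0 : Int), ([] : List Int))

def detect_grid (mask : List (List Bool)) : Option (List (Int × Int × Int × Int)) :=
  let h := mask.length
  let w := if h ≠ 0 then (mask.headD []).length else 0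
  let acc := pvSumsA w mask
  let col_sums := acc.1
  let row_sums := acc.2.reverse
  let vertical := find_separator_ranges col_sums
  let horizontal := find_separator_ranges row_sums
  if 2 ≤ vertical.length ∨ 2 ≤ horizontal.length then
    some (vertical.foldl (fun cells vr =>
      horizontal.foldl (fun cells hr => cells ++ [(vr.1, hr.1, vr.2, hr.2)]) cells) [])
  else none

-- ===== PORT B =====
-- runs(sl) of Source B: starts/ends by comparing each value with its shifted neighbour
def pvRuns (sl : List Int) : List (Int × Int) :=
  let starts := (PySem.List.enumerate (sl.zip (0 :: sl)) 0).filterMap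
    (fun x => if 0 < x.2.1 ∧ x.2.2 ≤ 0 then some x.1 else none)
  let ends := (PySem.List.enumerate (sl.zip (sl.drop 1 ++ [0])) 0).filterMap
    (fun x => if 0 < x.2.1 ∧ x.2.2 ≤ 0 then some (x.1 + 1) else none)
  starts.zip ends

-- row_sums / col_sums comprehensions of Source B ('sum(1 for … if …)' = countP)
def pvRowSums (w : Nat) (mask : List (List Bool)) : List Int :=
  mask.map (fun row => (((List.range w).countP (fun x => row.getD x false) : Nat) : Int))

def pvColSums (w : Nat) (mask : List (List Bool)) : List Int :=
  (List.range w).map (fun x => ((mask.countP (fun row => row.getD x false) : Nat) : Int))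

def detect_grid_alt (mask : List (List Bool)) : Option (List (Int × Int × Int × Int)) :=
  let h := mask.length
  let w := if h ≠ 0 then (mask.headD []).length else 0
  let row_sums := pvRowSums w mask
  let col_sums := pvColSums w mask
  let vertical := pvRuns col_sums
  let horizontal := pvRuns row_sums
  if 2 ≤ vertical.length ∨ 2 ≤ horizontal.length then
    some (vertical.flatMap (fun vr => horizontal.map (fun hr => (vr.1, hr.1, vr.2, hr.2))))
  else none

-- ===== PRECONDITION & SPEC =====
-- Pre_ excludes exactly the ragged masks on which Python A raises IndexError
-- (some row shorter than the first row); A returns normally everywhere else.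
def Pre_detect_grid (mask : List (List Bool)) : Prop :=
  ∀ row ∈ mask, (mask.headD []).length ≤ row.length
instance (mask : List (List Bool)) : Decidable (Pre_detect_grid mask) := by
  unfold Pre_detect_grid; infer_instance

def pvWitness_detect_grid : List (List Bool) :=
  [[true, false, true], [true, false, true], [false, false, false], [true, false, true]]

def Spec_detect_grid (mask : List (List Bool)) (out : Option (List (Int × Int × Int × Int))) : Prop := out = detect_grid_alt mask
instance (mask : List (List Bool)) (out : Option (List (Int × Int × Int × Int))) : Decidable (Spec_detect_grid mask out) := by unfold Spec_detect_grid; infer_instance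

-- ===== CLAIM (what is proved, stated in full; the proofs are below) =====
def Claim_equal_detect_grid : Prop := ∀ (mask : List (List Bool)), Dom_detect_grid mask → Pre_detect_grid mask → Spec_detect_grid mask (detect_grid mask)

-- ===== LEMMAS AND PROOFS =====

-- canonical run finder over the booleanised sum vector: both ports reduce to it
def pvRunsC : List Bool → Int → List (Int × Int)
  | [], _ => []
  | false :: t, i => pvRunsC t (i + 1)
  | true :: t, i =>
    (i, i + 1 + ((t.takeWhile id).length : Int)) ::
      pvRunsC (t.dropWhile id) (i + 1 + ((t.takeWhile id).length : Int))
termination_by bs _ => bs.length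
decreasing_by simp; exact Nat.lt_succ_of_le (List.length_dropWhile_le _ _)

-- ---- A-side: pvFsrGo = pvRunsC on nonnegative vectors ----

theorem pvTakePos_spec (t : List Int) (i : Nat) :
    pvTakePos t i = (t.dropWhile (fun v => decide (0 < v)),
      i + (t.takeWhile (fun v => decide (0 < v))).length) := by
  induction t generalizing i with
  | nil => simp [pvTakePos]
  | cons v t ih =>
    by_cases hv : 0 < v
    · simp [pvTakePos, hv, ih]; omega
    · simp [pvTakePos, hv]

theorem pvFsrGo_zero (fuel : Nat) (t : List Int) (i : Nat) :
    pvFsrGo (fuel + 1) (0 :: t) i = pvFsrGo (fuel + 1) t (i + 1) := by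
  simp [pvFsrGo, pvSkipZeros]

theorem pvFsrGo_pos (f : Nat) (v : Int) (t : List Int) (i : Nat) (hv : 0 < v) :
    pvFsrGo (f + 1) (v :: t) i
    = ((i : Int), ((i + 1 + (t.takeWhile (fun u => decide (0 < u))).length : Nat) : Int)) ::
        pvFsrGo f (t.dropWhile (fun u => decide (0 < u)))
          (i + 1 + (t.takeWhile (fun u => decide (0 < u))).length) := by
  have hvz : ¬ v = 0 := by omega
  have hq : pvTakePos (v :: t) i
      = (t.dropWhile (fun u => decide (0 < u)),
         i + 1 + (t.takeWhile (fun u => decide (0 < u))).length) := by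
    have h1 : pvTakePos (v :: t) i = pvTakePos t (i + 1) := by simp [pvTakePos, hv]
    rw [h1, pvTakePos_spec]
  simp only [pvFsrGo, pvSkipZeros, if_neg hvz, List.isEmpty_cons, hq]
  rfl

theorem pvFsrGo_eq (n : Nat) : ∀ (sl : List Int) (fuel i : Nat),
    sl.length ≤ n → sl.length < fuel → (∀ v ∈ sl, 0 ≤ v) →
    pvFsrGo fuel sl i = pvRunsC (sl.map (fun v => decide (0 < v))) i := by
  induction n with
  | zero =>
    intro sl fuel i hn hf _
    have hsl : sl = [] := List.eq_nil_of_length_eq_zero (Nat.le_zero.mp hn)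
    subst hsl
    cases fuel with
    | zero => exact absurd hf (by omega)
    | succ f => simp [pvFsrGo, pvSkipZeros, pvRunsC]
  | succ n ih =>
    intro sl fuel i hn hf hnn
    cases sl with
    | nil =>
      cases fuel with
      | zero => exact absurd hf (by omega)
      | succ f => simp [pvFsrGo, pvSkipZeros, pvRunsC]
    | cons v t =>
      cases fuel with
      | zero => exact absurd hf (by omega)
      | succ f =>
        have hv0 : 0 ≤ v := hnn v (by simp)
        by_cases hv : v = 0
        · subst hv
          rw [pvFsrGo_zero, ih t (f + 1) (i + 1) (by simpa using hn)
            (by simp only [List.length_cons] at hf; omega)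
            (fun u hu => hnn u (by simp [hu]))]
          have : pvRunsC (List.map (fun v => decide (0 < v)) (0 :: t)) i
              = pvRunsC (List.map (fun v => decide (0 < v)) t) (i + 1) := by
            rw [List.map_cons, show decide ((0:Int) < 0) = false from rfl, pvRunsC]
          rw [this]
          push_cast
          ring_nf
        · have hvp : 0 < v := by omega
          rw [pvFsrGo_pos f v t i hvp]
          have hlt : (t.dropWhile (fun u => decide (0 < u))).length < f := by
            have h1 := List.length_dropWhile_le (fun u => decide (0 < u)) t
            have h2 : t.length + 1 < f + 1 := hf
            omega
          have hle : (t.dropWhile (fun u => decide (0 < u))).length ≤ n := by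
            have h1 := List.length_dropWhile_le (fun u => decide (0 < u)) t
            have h2 : t.length + 1 ≤ n + 1 := hn
            omega
          rw [ih _ f _ hle hlt
            (fun u hu => hnn u (List.mem_cons_of_mem v ((List.dropWhile_sublist _).subset hu)))]
          have hmc : List.map (fun v => decide (0 < v)) (v :: t)
              = true :: List.map (fun v => decide (0 < v)) t := by
            simp [hvp]
          rw [hmc, pvRunsC]
          have htw : (List.takeWhile id (List.map (fun v => decide (0 < v)) t)).length
              = (t.takeWhile (fun u => decide (0 < u))).length := by
            rw [List.takeWhile_map]
            simp
          have hdw : List.dropWhile id (List.map (fun v => decide (0 < v)) t)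
              = List.map (fun v => decide (0 < v)) (t.dropWhile (fun u => decide (0 < u))) := by
            rw [List.dropWhile_map]
            simp
          rw [htw, hdw]
          have harith : ((i + 1 + (t.takeWhile (fun u => decide (0 < u))).length : Nat) : Int)
              = (i : Int) + 1 + ((t.takeWhile (fun u => decide (0 < u))).length : Int) := by
            push_cast
            ring
          rw [harith]

theorem find_separator_ranges_eq (sl : List Int) (h : ∀ v ∈ sl, 0 ≤ v) :
    find_separator_ranges sl = pvRunsC (sl.map (fun v => decide (0 < v))) 0 := by
  exact pvFsrGo_eq sl.length sl (sl.length + 1) 0 le_rfl (Nat.lt_succ_self _) h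

-- ---- B-side: pvRuns = pvRunsC ----

-- run starts as Source B's comprehension sees them, with the previous flag threaded
def pvStH : List Bool → Bool → Int → List Int
  | [], _, _ => []
  | b :: t, prev, i => (if b && !prev then [i] else []) ++ pvStH t b (i + 1)

-- run ends as Source B's comprehension sees them
def pvEnH : List Bool → Int → List Int
  | [], _ => []
  | b :: t, i => (if b && !(t.headD false) then [i + 1] else []) ++ pvEnH t (i + 1)

theorem pvCond (v p : Int) : (0 < v ∧ p ≤ 0) ↔ (decide (0 < v) && !decide (0 < p)) = true := by
  rw [Bool.and_eq_true, decide_eq_true_eq, Bool.not_eq_true', decide_eq_false_iff_not]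
  omega

theorem pvStarts_eq (sl : List Int) : ∀ (p i : Int),
    ((PySem.List.enumerate (sl.zip (p :: sl)) i).filterMap
      (fun x => if 0 < x.2.1 ∧ x.2.2 ≤ 0 then some x.1 else none))
    = pvStH (sl.map (fun v => decide (0 < v))) (decide (0 < p)) i := by
  induction sl with
  | nil => intro p i; rfl
  | cons v t ih =>
    intro p i
    have hz : (v :: t).zip (p :: v :: t) = (v, p) :: t.zip (v :: t) := rfl
    rw [hz, PySem.List.enumerate_cons]
    by_cases hc : 0 < v ∧ p ≤ 0
    · have hfa : (fun (x : Int × Int × Int) => if 0 < x.2.1 ∧ x.2.2 ≤ 0 then some x.1 else none)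
          (i, v, p) = some i := by
        show (if 0 < v ∧ p ≤ 0 then some i else none) = some i
        rw [if_pos hc]
      rw [List.filterMap_cons_some
            (f := fun (x : Int × Int × Int) => if 0 < x.2.1 ∧ x.2.2 ≤ 0 then some x.1 else none)
            (a := (i, v, p)) (l := PySem.List.enumerate (t.zip (v :: t)) (i + 1)) (b := i) hfa,
          ih v (i + 1)]
      have h1 : (0 < v) = True := by simp [hc.1]
      have h2 : (0 < p) = False := by simp only [eq_iff_iff, iff_false]; omega
      simp [pvStH, h1, h2]
    · have hfa : (fun (x : Int × Int × Int) => if 0 < x.2.1 ∧ x.2.2 ≤ 0 then some x.1 else none)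
          (i, v, p) = none := by
        show (if 0 < v ∧ p ≤ 0 then some i else none) = none
        rw [if_neg hc]
      rw [List.filterMap_cons_none
            (f := fun (x : Int × Int × Int) => if 0 < x.2.1 ∧ x.2.2 ≤ 0 then some x.1 else none)
            (a := (i, v, p)) (l := PySem.List.enumerate (t.zip (v :: t)) (i + 1)) hfa,
          ih v (i + 1)]
      have hb : (decide (0 < v) && !decide (0 < p)) = false := by
        rw [← Bool.not_eq_true]; exact fun hb => hc ((pvCond v p).mpr hb)
      simp [pvStH, hb]

theorem pvEnds_eq (sl : List Int) : ∀ (i : Int),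
    ((PySem.List.enumerate (sl.zip (sl.drop 1 ++ [0])) i).filterMap
      (fun x => if 0 < x.2.1 ∧ x.2.2 ≤ 0 then some (x.1 + 1) else none))
    = pvEnH (sl.map (fun v => decide (0 < v))) i := by
  induction sl with
  | nil => intro i; rfl
  | cons v t ih =>
    intro i
    cases t with
    | nil =>
      by_cases hv : 0 < v <;>
        simp [PySem.List.enumerate, PySem.List.enumerate_cons, pvEnH, hv]
    | cons u t' =>
      have hz : (v :: u :: t').zip ((v :: u :: t').drop 1 ++ [0])
          = (v, u) :: ((u :: t').zip ((u :: t').drop 1 ++ [0])) := rfl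
      rw [hz, PySem.List.enumerate_cons]
      by_cases hc : 0 < v ∧ u ≤ 0
      · have hfa : (fun (x : Int × Int × Int) => if 0 < x.2.1 ∧ x.2.2 ≤ 0 then some (x.1 + 1) else none)
            (i, v, u) = some (i + 1) := by
          show (if 0 < v ∧ u ≤ 0 then some (i + 1) else none) = some (i + 1)
          rw [if_pos hc]
        rw [List.filterMap_cons_some
              (f := fun (x : Int × Int × Int) => if 0 < x.2.1 ∧ x.2.2 ≤ 0 then some (x.1 + 1) else none)
              (a := (i, v, u)) (l := PySem.List.enumerate ((u :: t').zip ((u :: t').drop 1 ++ [0])) (i + 1))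
              (b := i + 1) hfa,
            ih (i + 1)]
        have h1 : (0 < v) = True := by simp [hc.1]
        have h2 : (0 < u) = False := by simp only [eq_iff_iff, iff_false]; omega
        simp [pvEnH, h1, h2]
      · have hfa : (fun (x : Int × Int × Int) => if 0 < x.2.1 ∧ x.2.2 ≤ 0 then some (x.1 + 1) else none)
            (i, v, u) = none := by
          show (if 0 < v ∧ u ≤ 0 then some (i + 1) else none) = none
          rw [if_neg hc]
        rw [List.filterMap_cons_none
              (f := fun (x : Int × Int × Int) => if 0 < x.2.1 ∧ x.2.2 ≤ 0 then some (x.1 + 1) else none)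
              (a := (i, v, u)) (l := PySem.List.enumerate ((u :: t').zip ((u :: t').drop 1 ++ [0])) (i + 1)) hfa,
            ih (i + 1)]
        have hb : (decide (0 < v) && !decide (0 < u)) = false := by
          rw [← Bool.not_eq_true]; exact fun hb => hc ((pvCond v u).mpr hb)
        simp [pvEnH, hb]

theorem pvStH_true (t : List Bool) : ∀ (i : Int),
    pvStH t true i = pvStH (t.dropWhile id) false (i + ((t.takeWhile id).length : Int)) := by
  induction t with
  | nil => intro i; simp [pvStH]
  | cons b t ih =>
    intro i
    cases b with
    | true =>
      have h1 : pvStH (true :: t) true i = pvStH t true (i + 1) := by simp [pvStH]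
      have hd : List.dropWhile id (true :: t) = List.dropWhile id t := by
        simp
      have ht : List.takeWhile id (true :: t) = true :: List.takeWhile id t := by
        simp
      rw [h1, ih (i + 1), hd, ht]
      congr 1
      push_cast [List.length_cons]
      ring
    | false =>
      simp [pvStH]

theorem pvEnH_true (t : List Bool) : ∀ (i : Int),
    pvEnH (true :: t) i = (i + 1 + ((t.takeWhile id).length : Int)) ::
      pvEnH (t.dropWhile id) (i + 1 + ((t.takeWhile id).length : Int)) := by
  induction t with
  | nil => intro i; simp [pvEnH]
  | cons b t ih =>
    intro i
    cases b with
    | true =>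
      have h1 : pvEnH (true :: true :: t) i = pvEnH (true :: t) (i + 1) := by
        simp [pvEnH]
      have hd : List.dropWhile id (true :: t) = List.dropWhile id t := by
        simp
      have ht : List.takeWhile id (true :: t) = true :: List.takeWhile id t := by
        simp
      rw [h1, ih (i + 1), hd, ht]
      have harith : i + 1 + 1 + ((List.takeWhile id t).length : Int)
          = i + 1 + (((true :: t.takeWhile id).length : Nat) : Int) := by
        push_cast [List.length_cons]; ring
      rw [← harith]
    | false =>
      simp [pvEnH]

theorem pvStH_runsC : ∀ (bs : List Bool) (i : Int),
    pvStH bs false i = (pvRunsC bs i).map Prod.fst := by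
  intro bs i
  induction bs, i using pvRunsC.induct with
  | case1 i => simp [pvStH, pvRunsC]
  | case2 t i ih => simp [pvStH, pvRunsC, ih]
  | case3 t i ih =>
    rw [pvRunsC]
    simp only [pvStH, List.map_cons]
    rw [pvStH_true, ih]
    simp

theorem pvEnH_runsC : ∀ (bs : List Bool) (i : Int),
    pvEnH bs i = (pvRunsC bs i).map Prod.snd := by
  intro bs i
  induction bs, i using pvRunsC.induct with
  | case1 i => simp [pvEnH, pvRunsC]
  | case2 t i ih => simp [pvEnH, pvRunsC, ih]
  | case3 t i ih =>
    rw [pvRunsC, pvEnH_true, ih]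
    simp

theorem pvRuns_eq (sl : List Int) :
    pvRuns sl = pvRunsC (sl.map (fun v => decide (0 < v))) 0 := by
  unfold pvRuns
  rw [pvStarts_eq, pvEnds_eq, pvEnH_runsC]
  have h0 : decide ((0:Int) < 0) = false := by decide
  rw [h0, pvStH_runsC]
  simp [List.zip_map']

-- ---- sums ----

theorem pvMapGetD (cs : List Int) : (List.range cs.length).map (fun x => cs.getD x 0) = cs := by
  apply List.ext_getElem
  · simp
  · intro i h1 h2
    simp [List.getD_eq_getElem?_getD, List.getElem?_eq_getElem h2]

theorem pvInner_spec (row : List Bool) (cs : List Int) : ∀ (n : Nat) (s : Int), n ≤ cs.length →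
    (List.range n).foldl (fun (p : List Int × Int) x =>
        if row.getD x false then (p.1.set x (p.1.getD x 0 + 1), p.2 + 1) else p) (cs, s)
    = ((List.range cs.length).map
         (fun x => cs.getD x 0 + if x < n ∧ row.getD x false then (1:Int) else 0),
       s + (((List.range n).countP (fun x => row.getD x false) : Nat) : Int)) := by
  intro n
  induction n with
  | zero =>
    intro s _
    have : ((List.range cs.length).map
        (fun x => cs.getD x 0 + if x < 0 ∧ row.getD x false then (1:Int) else 0))
        = (List.range cs.length).map (fun x => cs.getD x 0) := by
      apply List.map_congr_left
      intro x _
      rw [if_neg (by omega)]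
      ring
    rw [this, pvMapGetD]
    simp
  | succ n ih =>
    intro s h
    have hn : n ≤ cs.length := Nat.le_of_succ_le h
    have hnlt : n < cs.length := h
    rw [List.range_succ, List.foldl_append, ih s hn]
    simp only [List.foldl_cons, List.foldl_nil]
    by_cases hr : row.getD n false
    · rw [if_pos hr]
      have hget : ((List.range cs.length).map
          (fun x => cs.getD x 0 + if x < n ∧ row.getD x false then (1:Int) else 0)).getD n 0
          = cs.getD n 0 := by
        rw [PySem.List.getD_map_range _ _ _ _ hnlt, if_neg (by omega)]
        ring
      refine Prod.ext ?_ ?_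
      · show ((List.range cs.length).map _).set n _ = _
        rw [hget]
        apply List.ext_getElem
        · simp
        · intro k hk1 hk2
          simp only [List.length_set, List.length_map, List.length_range] at hk1
          rw [List.getElem_set]
          by_cases hkn : n = k
          · subst hkn
            rw [if_pos rfl]
            simp only [List.getElem_map, List.getElem_range]
            rw [if_pos ⟨by omega, hr⟩]
          · rw [if_neg hkn]
            simp only [List.getElem_map, List.getElem_range]
            by_cases hkr : row.getD k false
            · by_cases hklt : k < n
              · rw [if_pos ⟨hklt, hkr⟩, if_pos ⟨by omega, hkr⟩]
              · rw [if_neg (by tauto), if_neg (by omega)]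
            · rw [if_neg (by tauto), if_neg (by tauto)]
      · show s + _ + 1 = s + _
        rw [List.countP_append]
        have h1 : (List.countP (fun x => row.getD x false) [n]) = 1 := by
          rw [List.countP_cons, List.countP_nil, if_pos hr]
        rw [h1]
        push_cast
        ring
    · rw [if_neg hr]
      refine Prod.ext ?_ ?_
      · show (List.range cs.length).map _ = (List.range cs.length).map _
        apply List.map_congr_left
        intro x _
        by_cases hx : x < n ∧ row.getD x false
        · rw [if_pos hx, if_pos ⟨by omega, hx.2⟩]
        · rw [if_neg hx, if_neg ?_]
          rintro ⟨h1, h2⟩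
          rcases Nat.lt_succ_iff_lt_or_eq.mp h1 with h3 | h3
          · exact hx ⟨h3, h2⟩
          · subst h3; exact hr h2
      · show s + _ = s + _
        rw [List.countP_append]
        have h1 : (List.countP (fun x => row.getD x false) [n]) = 0 := by
          rw [List.countP_cons, List.countP_nil, if_neg hr]
        rw [h1]
        simp

theorem pvOuter_spec (w : Nat) : ∀ (rows : List (List Bool)) (cs rs : List Int), cs.length = w →
    rows.foldl (fun (acc : List Int × List Int) row =>
        let inner := (List.range w).foldl (fun (p : List Int × Int) x =>
            if row.getD x false then (p.1.set x (p.1.getD x 0 + 1), p.2 + 1) else p)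
          (acc.1, (0 : Int))
        (inner.1, inner.2 :: acc.2)) (cs, rs)
    = ((List.range w).map
         (fun x => cs.getD x 0 + ((rows.countP (fun row => row.getD x false) : Nat) : Int)),
       (pvRowSums w rows).reverse ++ rs) := by
  intro rows
  induction rows with
  | nil =>
    intro cs rs h
    subst h
    rw [List.foldl_nil]
    refine Prod.ext ?_ ?_
    · show cs = (List.range cs.length).map _
      apply List.ext_getElem
      · simp
      · intro k hk1 hk2
        simp only [List.getElem_map, List.getElem_range, List.countP_nil]
        simp [List.getD_eq_getElem?_getD, List.getElem?_eq_getElem hk1]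
    · show rs = _
      simp [pvRowSums]
  | cons r rest ih =>
    intro cs rs h
    rw [List.foldl_cons]
    have hw : w ≤ cs.length := le_of_eq h.symm
    simp only []
    rw [pvInner_spec r cs w 0 hw]
    rw [ih _ _ (by simp [h])]
    refine Prod.ext ?_ ?_
    · show (List.range w).map _ = (List.range w).map _
      apply List.map_congr_left
      intro x hx
      have hxw : x < w := List.mem_range.mp hx
      have hxcs : x < cs.length := by omega
      rw [PySem.List.getD_map_range _ _ _ _ hxcs]
      rw [List.countP_cons]
      by_cases hrx : r.getD x false
      · rw [if_pos ⟨hxw, hrx⟩, if_pos hrx]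
        push_cast
        ring
      · rw [if_neg (by tauto), if_neg hrx]
        push_cast
        ring
    · show _ ++ ((0 : Int) + _) :: rs = _
      have hrow : pvRowSums w (r :: rest)
          = (((List.range w).countP (fun x => r.getD x false) : Nat) : Int) :: pvRowSums w rest := by
        simp [pvRowSums]
      rw [hrow, List.reverse_cons, List.append_assoc]
      simp

theorem pvColSums_eq (w : Nat) (mask : List (List Bool)) :
    (pvSumsA w mask).1 = pvColSums w mask := by
  unfold pvSumsA
  rw [pvOuter_spec w mask _ _ (by simp)]
  simp [pvColSums]

theorem pvRowSums_eq (w : Nat) (mask : List (List Bool)) :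
    (pvSumsA w mask).2.reverse = pvRowSums w mask := by
  unfold pvSumsA
  rw [pvOuter_spec w mask _ _ (by simp)]
  simp

theorem pvColSums_nonneg (w : Nat) (mask : List (List Bool)) :
    ∀ v ∈ pvColSums w mask, 0 ≤ v := by
  intro v hv
  simp only [pvColSums, List.mem_map] at hv
  obtain ⟨x, -, rfl⟩ := hv
  exact Int.natCast_nonneg _

theorem pvRowSums_nonneg (w : Nat) (mask : List (List Bool)) :
    ∀ v ∈ pvRowSums w mask, 0 ≤ v := by
  intro v hv
  simp only [pvRowSums, List.mem_map] at hv
  obtain ⟨row, -, rfl⟩ := hv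
  exact Int.natCast_nonneg _

-- ---- cells ----

theorem pvCells_eq (hs : List (Int × Int)) : ∀ (vs : List (Int × Int)) (acc : List (Int × Int × Int × Int)),
    vs.foldl (fun cells vr =>
        hs.foldl (fun cells hr => cells ++ [(vr.1, hr.1, vr.2, hr.2)]) cells) acc
    = acc ++ vs.flatMap (fun vr => hs.map (fun hr => (vr.1, hr.1, vr.2, hr.2))) := by
  intro vs
  induction vs with
  | nil => simp
  | cons vr vs ih =>
    intro acc
    rw [List.foldl_cons, PySem.List.foldl_append_singleton_eq_map, ih, List.flatMap_cons,
      List.append_assoc]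

-- ===== VERDICT (by name: the statement is the Claim_ definition above) =====
theorem detect_grid_spec : Claim_equal_detect_grid := by
  intro mask _ _
  unfold Spec_detect_grid
  simp only [detect_grid, detect_grid_alt]
  rw [pvColSums_eq, pvRowSums_eq]
  rw [find_separator_ranges_eq _ (pvColSums_nonneg _ _),
      find_separator_ranges_eq _ (pvRowSums_nonneg _ _),
      ← pvRuns_eq, ← pvRuns_eq]
  split
  · rw [pvCells_eq]; simp
  · rfl
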